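-- pv_equiv track=rewrite | github.com/Not-Yeshwanth-Reddy/PC_Assistant | process/understand.py | remove_waste_mouse_logs
-- ===== SOURCE A (Python) =====
-- def remove_waste_mouse_logs(log_list):									# Removing Extra MouseMoved Logs
-- 	line_no = 0
-- 	count = 0
-- 	word_list = []
-- 	for line in log_list:
-- 		if "Mouse _|_ Moved" in line:
-- 			if count == 0:
-- 				word_list.append(log_list[line_no]) 								# append to the list
-- 			count += 1
-- 		else:
-- 			if count != 0:
-- 				word_list.append(log_list[(line_no-1)]) 							# append to the list
-- 			word_list.append(log_list[line_no]) 									# append to the list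
-- 			count = 0
-- 		line_no += 1
-- 	return word_list
-- ===== SOURCE B (Python) =====
-- def remove_waste_mouse_logs(log_list):
--     # Two-pointer index loop: find each mouse run in one inner scan and emit
--     # its endpoints, instead of A's per-line counter state machine.
--     out = []
--     n = len(log_list)
--     i = 0
--     while i < n:
--         if "Mouse _|_ Moved" not in log_list[i]:
--             out.append(log_list[i])
--             i += 1
--         else:
--             j = i + 1
--             while j < n and "Mouse _|_ Moved" in log_list[j]:
--                 j += 1
--             out.append(log_list[i])
--             if j == n:
--                 break
--             out.append(log_list[j - 1])
--             out.append(log_list[j])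
--             i = j + 1
--     return out
-- ===== Notes on version B (the rewrite author's own statement) =====
-- stated objective: alternative
-- what changed: Replaces A's single-pass counter state machine (per-line count flag with index arithmetic into the original list) by a two-pointer index loop that locates each mouse-moved run with an inner scan and emits the run's endpoints directly.
import Mathlib
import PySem

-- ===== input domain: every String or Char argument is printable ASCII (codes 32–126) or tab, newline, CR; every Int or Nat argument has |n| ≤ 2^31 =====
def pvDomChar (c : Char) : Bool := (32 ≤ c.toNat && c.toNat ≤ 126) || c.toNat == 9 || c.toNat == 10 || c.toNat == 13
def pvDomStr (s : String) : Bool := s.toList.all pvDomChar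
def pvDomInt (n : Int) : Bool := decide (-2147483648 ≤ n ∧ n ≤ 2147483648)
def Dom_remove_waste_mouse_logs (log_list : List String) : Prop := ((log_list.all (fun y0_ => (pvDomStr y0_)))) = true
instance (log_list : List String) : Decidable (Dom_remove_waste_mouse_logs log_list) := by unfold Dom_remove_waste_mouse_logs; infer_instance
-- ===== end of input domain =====

-- B replaces A's per-line counter state machine by a two-pointer index loop that
-- scans each mouse run once and emits its endpoints (alternative decomposition,
-- same cost); return values are proved identical on all inputs.

-- "Mouse _|_ Moved" in line  (shared literal condition of both Pythons)
def mouseLine (s : String) : Bool := PySem.Str.isIn "Mouse _|_ Moved" s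

-- ===== PORT A =====
-- A's loop body; list indexing log_list[line_no] / log_list[line_no-1] is ported by
-- pyGet? (indices are always in range when reached, so the "" default never shows).
def aStep (log : List String) : (Int × Int × List String) → String → (Int × Int × List String) :=
  fun s line =>
    let line_no := s.1
    let count := s.2.1
    let word_list := s.2.2
    if mouseLine line then
      (line_no + 1, count + 1,
        if count = 0 then word_list ++ [(PySem.List.pyGet? log line_no).getD ""] else word_list)
    else
      (line_no + 1, 0,
        (if count ≠ 0 then word_list ++ [(PySem.List.pyGet? log (line_no - 1)).getD ""] else word_list)
          ++ [(PySem.List.pyGet? log line_no).getD ""])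

def remove_waste_mouse_logs (log_list : List String) : List String :=
  (log_list.foldl (aStep log_list) (0, 0, [])).2.2

-- ===== PORT B =====
-- inner scan:  while j < n and "Mouse _|_ Moved" in log_list[j]: j += 1
def bScan (log : List String) (n j : Nat) : Nat :=
  if j < n ∧ mouseLine ((log[j]?).getD "") then bScan log n (j + 1) else j
termination_by n - j
decreasing_by omega

theorem bScan_ge (log : List String) (n j : Nat) : j ≤ bScan log n j := by
  unfold bScan
  split
  · exact le_trans (by omega) (bScan_ge log n (j + 1))
  · exact le_refl j
termination_by n - j
decreasing_by omega

-- outer loop:  while i < n: …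
def bLoop (log : List String) (n i : Nat) : List String :=
  if i < n then
    let x := (log[i]?).getD ""
    if ¬ mouseLine x then x :: bLoop log n (i + 1)
    else
      let j := bScan log n (i + 1)
      if j = n then [x]
      else x :: (log[j - 1]?).getD "" :: (log[j]?).getD "" :: bLoop log n (j + 1)
  else []
termination_by n - i
decreasing_by
  · omega
  · have := bScan_ge log n (i + 1); omega

def remove_waste_mouse_logs_alt (log_list : List String) : List String :=
  bLoop log_list log_list.length 0

-- ===== PRECONDITION & SPEC =====
def Spec_remove_waste_mouse_logs (log_list : List String) (out : List String) : Prop := out = remove_waste_mouse_logs_alt log_list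
instance (log_list : List String) (out : List String) : Decidable (Spec_remove_waste_mouse_logs log_list out) := by unfold Spec_remove_waste_mouse_logs; infer_instance

-- ===== CLAIM (what is proved, stated in full; the proofs are below) =====
def Claim_equal_remove_waste_mouse_logs : Prop := ∀ (log_list : List String), Dom_remove_waste_mouse_logs log_list → Spec_remove_waste_mouse_logs log_list (remove_waste_mouse_logs log_list)

-- ===== LEMMAS AND PROOFS =====

-- Common specification: gSpec is the collapsed log; hSpec p l continues a mouse run
-- whose last seen line is p.
mutual
def gSpec : List String → List String
  | [] => []
  | x :: xs => if mouseLine x then x :: hSpec x xs else x :: gSpec xs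
def hSpec : String → List String → List String
  | _, [] => []
  | p, y :: ys => if mouseLine y then hSpec y ys else p :: y :: gSpec ys
end

theorem drop_head (log : List String) (i : Nat) (x : String) (xs : List String)
    (h : log.drop i = x :: xs) : log[i]? = some x ∧ log.drop (i + 1) = xs := by
  constructor
  · have h0 : (List.drop i log)[0]? = some x := by rw [h]; rfl
    rw [List.getElem?_drop] at h0; simpa using h0
  · have h1 : (log.drop i).drop 1 = log.drop (i + 1) := by
      rw [List.drop_drop]
    rw [← h1, h]; simp

theorem aFold_eq (log : List String) : ∀ (l : List String) (i : Nat) (acc : List String),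
    log.drop i = l →
    ((l.foldl (aStep log) ((i : Int), 0, acc)).2.2 = acc ++ gSpec l
      ∧ ∀ (c : Int) (p : String), 1 ≤ c → 1 ≤ i → log[i - 1]? = some p →
          (l.foldl (aStep log) ((i : Int), c, acc)).2.2 = acc ++ hSpec p l) := by
  intro l
  induction l with
  | nil => intro i acc _; simp [gSpec, hSpec]
  | cons x xs ih =>
    intro i acc hdrop
    obtain ⟨hget, hdrop'⟩ := drop_head log i x xs hdrop
    have hx : (PySem.List.pyGet? log (i : Int)).getD "" = x := by
      simp [PySem.List.pyGet?_natCast, hget]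
    have hcast : ((i : Int) + 1) = ((i + 1 : Nat) : Int) := by push_cast; ring
    constructor
    · -- count = 0
      by_cases hm : mouseLine x
      · have IH := (ih (i + 1) (acc ++ [x]) hdrop').2 1 x (by norm_num) (by omega)
          (by simpa using hget)
        simp only [List.foldl_cons, aStep, hm, hx, hcast]
        norm_num
        try simp only [hcast]
        rw [IH]
        simp [gSpec, hm]
      · have IH := (ih (i + 1) (acc ++ [x]) hdrop').1
        simp only [List.foldl_cons, aStep, hm, hx, hcast]
        norm_num
        try simp only [hcast]
        rw [IH]
        simp [gSpec, hm]
    · -- count = c ≥ 1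
      intro c p hc hi hp
      by_cases hm : mouseLine x
      · have hc0 : ¬ (c = 0) := by omega
        have IH := (ih (i + 1) acc hdrop').2 (c + 1) x (by omega) (by omega)
          (by simpa using hget)
        simp only [List.foldl_cons, aStep, hm, hx, hcast, hc0, reduceIte]
        try simp only [hcast]
        rw [IH]
        simp [hSpec, hm]
      · have hc0 : ¬ (c = 0) := by omega
        have hidx : ((i : Int) - 1) = ((i - 1 : Nat) : Int) := by omega
        have hpv : (PySem.List.pyGet? log ((i : Int) - 1)).getD "" = p := by
          rw [hidx]; simp [PySem.List.pyGet?_natCast, hp]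
        have IH := (ih (i + 1) (acc ++ [p] ++ [x]) hdrop').1
        simp only [List.foldl_cons, aStep, hm, hx, hcast, hc0, if_neg,
          ne_eq, not_false_eq_true, if_pos, hpv]
        norm_num
        rw [show acc ++ [p] ++ [x] = acc ++ [p, x] by simp] at IH
        try simp only [hcast]
        rw [IH]
        simp [hSpec, hm]

theorem A_eq_gSpec (log : List String) : remove_waste_mouse_logs log = gSpec log := by
  have := (aFold_eq log log 0 [] (by simp)).1
  simpa [remove_waste_mouse_logs] using this

theorem bMain (log : List String) (n : Nat) (hn : n = log.length) :
    ∀ (m i : Nat), n - i ≤ m →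
      (bLoop log n i = gSpec (log.drop i)
        ∧ ∀ p : String, 1 ≤ i → i ≤ n → log[i - 1]? = some p →
            (if bScan log n i = n then ([] : List String)
             else (log[bScan log n i - 1]?).getD "" :: (log[bScan log n i]?).getD ""
                    :: bLoop log n (bScan log n i + 1))
              = hSpec p (log.drop i)) := by
  intro m
  induction m with
  | zero =>
    intro i hm
    have hge : n ≤ i := by omega
    have hdrop : log.drop i = [] := by
      apply List.drop_eq_nil_of_le; omega
    constructor
    · rw [bLoop]; simp [Nat.not_lt.mpr hge, hdrop, gSpec]
    · intro p _ hle _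
      have hin : i = n := by omega
      subst hin
      rw [bScan]
      simp [hdrop, hSpec]
  | succ m ihm =>
    intro i hm
    by_cases hlt : i < n
    · have hi : i < log.length := by omega
      have hdrop : log.drop i = log[i] :: log.drop (i + 1) :=
        List.drop_eq_getElem_cons hi
      have hget : (log[i]?).getD "" = log[i] := by simp [List.getElem?_eq_getElem hi]
      constructor
      · rw [bLoop]
        by_cases hmou : mouseLine log[i]
        · simp only [hlt, if_pos, hget, hmou, not_true_eq_false, reduceIte]
          have hh := (ihm (i + 1) (by omega)).2 log[i] (by omega) (by omega)
            (by simp [List.getElem?_eq_getElem hi])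
          rw [hdrop, gSpec]
          simp only [hmou, if_pos]
          rw [← hh]
          by_cases hj : bScan log n (i + 1) = n <;> simp [hj]
        · simp only [hlt, if_pos, hget, hmou, if_pos]
          have := (ihm (i + 1) (by omega)).1
          rw [this, hdrop, gSpec]
          simp [hmou]
      · intro p hp1 _ hp
        by_cases hmou : mouseLine log[i]
        · have hsc : bScan log n i = bScan log n (i + 1) := by
            rw [bScan]; simp [hlt, hget, hmou]
          rw [hsc]
          have := (ihm (i + 1) (by omega)).2 log[i] (by omega) (by omega)
            (by simp [List.getElem?_eq_getElem hi])
          rw [this, hdrop, hSpec]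
          simp [hmou]
        · have hsc : bScan log n i = i := by
            rw [bScan]; simp [hget, hmou]
          rw [hsc]
          have hne : ¬ (i = n) := by omega
          rw [if_neg hne]
          have := (ihm (i + 1) (by omega)).1
          rw [this, hdrop, hSpec]
          simp [hmou, hp, List.getElem?_eq_getElem hi]
    · -- i ≥ n: same as base case
      have hge : n ≤ i := by omega
      have hdrop : log.drop i = [] := by
        apply List.drop_eq_nil_of_le; omega
      constructor
      · rw [bLoop]; simp [Nat.not_lt.mpr hge, hdrop, gSpec]
      · intro p _ hle _
        have hin : i = n := by omega
        subst hin
        rw [bScan]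
        simp [hdrop, hSpec]

theorem B_eq_gSpec (log : List String) : remove_waste_mouse_logs_alt log = gSpec log := by
  have := (bMain log log.length rfl (log.length) 0 (by omega)).1
  simpa [remove_waste_mouse_logs_alt] using this

-- ===== VERDICT (by name: the statement is the Claim_ definition above) =====
theorem remove_waste_mouse_logs_spec : Claim_equal_remove_waste_mouse_logs := by
  intro log_list _
  unfold Spec_remove_waste_mouse_logs
  rw [A_eq_gSpec, B_eq_gSpec]
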